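-- pv_equiv track=rewrite | github.com/LucioRuizDiaz/IP-Algo-I | parciales/Python/Parcial Comision D 1c2024/parcial_comisionD_1c2024_mateo.py | stock_productos
-- ===== SOURCE A (Python) =====
-- def minimo_lista(lista:list[int])->int:
--     ind_lista: int
--     aux:int = lista[0]
--     res:int
--     for ind_lista in range(len(lista)):
--         if aux > lista[ind_lista]:
--             aux = lista[ind_lista]
--     return aux
--
-- def maximo_lista(lista:list[int])->int:
--     ind_lista: int
--     aux:int = lista[0]
--     res:int
--     for ind_lista in range(len(lista)):
--         if aux <= lista[ind_lista]:
--             aux = lista[ind_lista]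
--     return aux
--
-- def primer_elemento(tupla:list):
--     return tupla[0]
--
-- def segundo_elemento(tupla:list):
--     return tupla[1]
--
-- def lista_productos(lista:list[str,int])->list[str]:
--     ind: int
--     res:list = []
--     for ind in range(len(lista)):
--         if not primer_elemento(lista[ind]) in res:
--             res.append(primer_elemento(lista[ind]))
--     return res
--
-- def stock_productos(stock_cambios:list)->dict:
--     ind_cambios: int
--     ind_productos:int
--     lista_aux:list = []
--     aux:int = 0
--     productos = lista_productos(stock_cambios)
--     tupla_aux:tuple = ()
--     diccionario = dict()
--     lista_productos_ya_cargados:list = []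
--
--     for ind_productos in range(len(productos)):
--         if not productos[ind_productos] in lista_productos_ya_cargados:
--             for ind_cambios in range(len(stock_cambios)):
--                 if primer_elemento(stock_cambios[ind_cambios]) == productos[ind_productos]:
--                     aux = aux + segundo_elemento(stock_cambios[ind_cambios])
--                     lista_aux.append(aux)
--
--             tupla_aux = (minimo_lista(lista_aux),maximo_lista(lista_aux))
--             lista_aux = []
--             lista_productos_ya_cargados.append(productos[ind_productos])
--             diccionario[productos[ind_productos]] = tupla_aux
--             aux = 0
--             tupla_aux = ()
--
--     return diccionario
-- ===== SOURCE B (Python) =====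
-- def stock_productos(stock_cambios: list) -> dict:
--     # One pass: per product keep (running sum, min so far, max so far).
--     estado = {}
--     for producto, cambio in stock_cambios:
--         if producto in estado:
--             s, mn, mx = estado[producto]
--             s += cambio
--             estado[producto] = (s, min(mn, s), max(mx, s))
--         else:
--             estado[producto] = (cambio, cambio, cambio)
--     return {p: (mn, mx) for p, (s, mn, mx) in estado.items()}
-- ===== Notes on version B (the rewrite author's own statement) =====
-- stated objective: faster
-- what changed: Replaces the per-product rescans of the whole list (plus separate min/max passes over an intermediate prefix-sum list) by a single pass that keeps a dict mapping each product to its running sum, minimum and maximum.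
import Mathlib
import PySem

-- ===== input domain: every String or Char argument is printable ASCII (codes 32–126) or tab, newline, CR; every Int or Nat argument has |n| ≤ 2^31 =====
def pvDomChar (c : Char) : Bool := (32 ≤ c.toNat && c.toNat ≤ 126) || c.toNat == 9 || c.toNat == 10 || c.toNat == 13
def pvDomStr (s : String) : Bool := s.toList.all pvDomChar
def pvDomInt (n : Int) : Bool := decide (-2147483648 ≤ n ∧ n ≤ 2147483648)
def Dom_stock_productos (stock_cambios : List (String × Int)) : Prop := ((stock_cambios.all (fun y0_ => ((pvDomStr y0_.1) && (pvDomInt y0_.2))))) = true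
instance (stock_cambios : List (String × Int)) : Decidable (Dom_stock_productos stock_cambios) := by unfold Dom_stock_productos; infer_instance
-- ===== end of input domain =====

-- B replaces A's per-product rescans (O(P*N)) by one pass keeping (running sum, min, max) per product in a dict.

-- ===== PORT A =====
-- aux = lista[0]; every call site in stock_productos passes a nonempty list, so headD's default is unreachable there
def minimo_lista (lista : List Int) : Int :=
  lista.foldl (fun aux x => if aux > x then x else aux) (lista.headD 0)

def maximo_lista (lista : List Int) : Int :=
  lista.foldl (fun aux x => if aux ≤ x then x else aux) (lista.headD 0)

-- primer_elemento / segundo_elemento are tuple projections, written .1 / .2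
def lista_productos (lista : List (String × Int)) : List String :=
  lista.foldl (fun res t => if !(res.contains t.1) then res ++ [t.1] else res) []

def stock_productos (stock_cambios : List (String × Int)) : List (String × Int × Int) :=
  let productos := lista_productos stock_cambios
  let st := productos.foldl
    (fun (st : PySem.Dict String (Int × Int) × List String) p =>
      if !(st.2.contains p) then
        let la := stock_cambios.foldl
          (fun (s : Int × List Int) t => if t.1 == p then (s.1 + t.2, s.2 ++ [s.1 + t.2]) else s)
          (0, [])
        (st.1.insert p (minimo_lista la.2, maximo_lista la.2), st.2 ++ [p])
      else st)
    (PySem.Dict.empty, [])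
  st.1.items

-- ===== PORT B =====
def stock_productos_alt (stock_cambios : List (String × Int)) : List (String × Int × Int) :=
  let estado := stock_cambios.foldl
    (fun (d : PySem.Dict String (Int × Int × Int)) t =>
      match d.get? t.1 with
      | some (s, mn, mx) => d.insert t.1 (s + t.2, min mn (s + t.2), max mx (s + t.2))
      | none => d.insert t.1 (t.2, t.2, t.2))
    PySem.Dict.empty
  estado.items.map (fun kv => (kv.1, kv.2.2.1, kv.2.2.2))

-- ===== PRECONDITION & SPEC =====
def Spec_stock_productos (stock_cambios : List (String × Int)) (out : List (String × Int × Int)) : Prop := out = stock_productos_alt stock_cambios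
instance (stock_cambios : List (String × Int)) (out : List (String × Int × Int)) : Decidable (Spec_stock_productos stock_cambios out) := by unfold Spec_stock_productos; infer_instance

-- ===== CLAIM (what is proved, stated in full; the proofs are below) =====
def Claim_equal_stock_productos : Prop := ∀ (stock_cambios : List (String × Int)), Dom_stock_productos stock_cambios → Spec_stock_productos stock_cambios (stock_productos stock_cambios)

-- ===== LEMMAS AND PROOFS =====

-- prefix sums of vs starting from accumulator a
def pvCum (a : Int) : List Int → List Int
  | [] => []
  | x :: xs => (a + x) :: pvCum (a + x) xs

-- the changes recorded for product p, in order
def pvVals (p : String) (xs : List (String × Int)) : List Int :=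
  (xs.filter (fun t => t.1 == p)).map (·.2)

def pvStepT (s : Int × Int × Int) (x : Int) : Int × Int × Int :=
  (s.1 + x, min s.2.1 (s.1 + x), max s.2.2 (s.1 + x))

def pvTrip : List Int → Int × Int × Int
  | [] => (0, 0, 0)
  | v :: vs => vs.foldl pvStepT (v, v, v)

theorem minimo_eq_foldl_min (l : List Int) : minimo_lista l = l.foldl min (l.headD 0) := by
  unfold minimo_lista
  congr 1
  funext a x
  rw [Int.min_def]; split_ifs <;> omega

theorem maximo_eq_foldl_max (l : List Int) : maximo_lista l = l.foldl max (l.headD 0) := by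
  unfold maximo_lista
  congr 1

theorem lista_productos_eq (xs : List (String × Int)) :
    lista_productos xs = PySem.Set.ofList (xs.map (·.1)) := by
  rw [PySem.Set.ofList_eq_foldl, List.foldl_map]
  unfold lista_productos
  congr 1
  funext res t
  simp only [PySem.Set.add]
  by_cases h : res.contains t.1 <;> simp [h]

theorem inner_fold_eq (xs : List (String × Int)) (p : String) :
    ∀ (a : Int) (l : List Int),
      xs.foldl (fun (s : Int × List Int) t =>
          if t.1 == p then (s.1 + t.2, s.2 ++ [s.1 + t.2]) else s) (a, l)
        = (a + (pvVals p xs).sum, l ++ pvCum a (pvVals p xs)) := by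
  induction xs with
  | nil => intro a l; simp [pvVals, pvCum]
  | cons t xs ih =>
    intro a l
    by_cases h : t.1 = p
    · simp only [List.foldl_cons, h, beq_self_eq_true, if_true]
      rw [ih]
      have hv : pvVals p (t :: xs) = t.2 :: pvVals p xs := by
        simp [pvVals, List.filter_cons, h]
      rw [hv]
      simp [pvCum, List.append_assoc]
      ring
    · have hb : (t.1 == p) = false := by simp [h]
      simp only [List.foldl_cons, hb]
      have hv : pvVals p (t :: xs) = pvVals p xs := by
        simp [pvVals, hb]
      simp only [Bool.false_eq_true, if_false]
      rw [ih, hv]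

theorem trip_fold_eq : ∀ (rest : List Int) (s mn mx : Int),
    rest.foldl pvStepT (s, mn, mx)
      = (s + rest.sum, (pvCum s rest).foldl min mn, (pvCum s rest).foldl max mx) := by
  intro rest
  induction rest with
  | nil => intro s mn mx; simp [pvCum]
  | cons x rest ih =>
    intro s mn mx
    simp only [List.foldl_cons, pvStepT, pvCum, List.sum_cons]
    rw [ih]
    congr 1
    ring

theorem trip_append (vs : List Int) (x : Int) (h : vs ≠ []) :
    pvTrip (vs ++ [x]) = pvStepT (pvTrip vs) x := by
  match vs with
  | [] => exact absurd rfl h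
  | v :: rest => simp [pvTrip, List.foldl_append]

theorem vals_append (q : String) (xs : List (String × Int)) (t : String × Int) :
    pvVals q (xs ++ [t]) = pvVals q xs ++ (if t.1 == q then [t.2] else []) := by
  by_cases h : t.1 = q <;> simp [pvVals, List.filter_append, h]

theorem vals_nil_of_not_mem (p : String) (xs : List (String × Int))
    (h : p ∉ xs.map (·.1)) : pvVals p xs = [] := by
  simp only [pvVals, List.map_eq_nil_iff, List.filter_eq_nil_iff]
  intro t ht
  simp only [beq_iff_eq]
  intro he
  exact h (List.mem_map.mpr ⟨t, ht, he⟩)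

theorem vals_ne_nil_of_mem (p : String) (xs : List (String × Int))
    (h : p ∈ xs.map (·.1)) : pvVals p xs ≠ [] := by
  obtain ⟨t, ht, he⟩ := List.mem_map.mp h
  simp only [pvVals, ne_eq, List.map_eq_nil_iff, List.filter_eq_nil_iff]
  intro hc
  exact absurd (by simp [he]) (hc t ht)

-- B's loop characterised: the dict's items are the distinct keys (first occurrence) with (sum, min, max)
theorem b_fold_items (xs : List (String × Int)) :
    (xs.foldl
      (fun (d : PySem.Dict String (Int × Int × Int)) t =>
        match d.get? t.1 with
        | some (s, mn, mx) => d.insert t.1 (s + t.2, min mn (s + t.2), max mx (s + t.2))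
        | none => d.insert t.1 (t.2, t.2, t.2))
      PySem.Dict.empty).items
    = (PySem.Set.ofList (xs.map (·.1))).map (fun p => (p, pvTrip (pvVals p xs))) := by
  induction xs using List.reverseRecOn with
  | nil => rfl
  | append_singleton xs t ih =>
    rw [List.foldl_append, List.foldl_cons, List.foldl_nil]
    set d := xs.foldl
      (fun (d : PySem.Dict String (Int × Int × Int)) t =>
        match d.get? t.1 with
        | some (s, mn, mx) => d.insert t.1 (s + t.2, min mn (s + t.2), max mx (s + t.2))
        | none => d.insert t.1 (t.2, t.2, t.2))
      PySem.Dict.empty with hd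
    have hkeys : d.keys = PySem.Set.ofList (xs.map (·.1)) := by
      show d.items.map (·.1) = _
      rw [ih, List.map_map]
      simp [Function.comp_def]
    have hnd : d.keys.Nodup := by rw [hkeys]; exact PySem.Set.nodup_ofList _
    have hset : PySem.Set.ofList ((xs ++ [t]).map (·.1))
        = PySem.Set.add (PySem.Set.ofList (xs.map (·.1))) t.1 := by
      rw [List.map_append, PySem.Set.ofList_eq_foldl, List.foldl_append,
        ← PySem.Set.ofList_eq_foldl]
      rfl
    by_cases hmem : t.1 ∈ xs.map (·.1)
    · -- key already present: get? finds the old triple, insert overwrites in place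
      have hmemset : t.1 ∈ PySem.Set.ofList (xs.map (·.1)) := by
        rw [PySem.Set.mem_ofList]; exact hmem
      have hitem : (t.1, pvTrip (pvVals t.1 xs)) ∈ d.items := by
        rw [ih]; exact List.mem_map.mpr ⟨t.1, hmemset, rfl⟩
      have hget : d.get? t.1 = some (pvTrip (pvVals t.1 xs)) :=
        PySem.Dict.get?_of_mem_items d hitem hnd
      have hcont : d.contains t.1 = true := by
        rw [PySem.Dict.contains_eq_isSome_get?, hget]; rfl
      rw [hget]
      have hv : pvVals t.1 (xs ++ [t]) = pvVals t.1 xs ++ [t.2] := by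
        rw [vals_append]; simp
      have hadd : PySem.Set.add (PySem.Set.ofList (xs.map (·.1))) t.1
          = PySem.Set.ofList (xs.map (·.1)) := by
        simp [PySem.Set.add, PySem.Set.contains, hmem, PySem.Set.mem_ofList]
      cases htrip : pvTrip (pvVals t.1 xs) with
      | mk s rest =>
        cases rest with
        | mk mn mx =>
          rw [PySem.Dict.items_insert_of_contains d _ hcont, ih, hset, hadd, List.map_map]
          apply List.map_congr_left
          intro q hq
          by_cases hqp : q = t.1
          · subst hqp
            simp only [Function.comp, beq_self_eq_true, if_true, hv]
            rw [trip_append _ _ (vals_ne_nil_of_mem _ _ hmem), htrip]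
            rfl
          · have : (q == t.1) = false := by simp [hqp]
            simp only [Function.comp, this]
            rw [vals_append]
            have : (t.1 == q) = false := by simp [Ne.symm hqp]
            simp [this]
    · -- fresh key: get? = none, insert appends
      have hnotset : t.1 ∉ PySem.Set.ofList (xs.map (·.1)) := by
        rw [PySem.Set.mem_ofList]; exact hmem
      have hget : d.get? t.1 = none := by
        rw [PySem.Dict.get?_eq_none_iff_not_mem_keys d, hkeys]; exact hnotset
      have hcont : d.contains t.1 = false := by
        rw [PySem.Dict.contains_eq_isSome_get?, hget]; rfl
      rw [hget]
      have hadd : PySem.Set.add (PySem.Set.ofList (xs.map (·.1))) t.1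
          = PySem.Set.ofList (xs.map (·.1)) ++ [t.1] := by
        simp [PySem.Set.add, PySem.Set.contains, PySem.Set.mem_ofList, hmem]
      rw [PySem.Dict.items_insert_of_not_contains d _ hcont, ih, hset, hadd,
        List.map_append]
      congr 1
      · apply List.map_congr_left
        intro q hq
        have hqp : q ≠ t.1 := fun he => hnotset (he ▸ hq)
        rw [vals_append]
        have : (t.1 == q) = false := by simp [Ne.symm hqp]
        simp [this]
      · have hv : pvVals t.1 (xs ++ [t]) = [t.2] := by
          rw [vals_append, vals_nil_of_not_mem _ _ hmem]; simp
        simp [hv, pvTrip]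

-- A's outer loop characterised
theorem a_fold_items (xs : List (String × Int)) :
    ∀ (ps : List String) (d : PySem.Dict String (Int × Int)) (c : List String),
      ps.Nodup → (∀ p ∈ ps, c.contains p = false) → (∀ p ∈ ps, d.contains p = false) →
      (ps.foldl
        (fun (st : PySem.Dict String (Int × Int) × List String) p =>
          if !(st.2.contains p) then
            let la := xs.foldl
              (fun (s : Int × List Int) t => if t.1 == p then (s.1 + t.2, s.2 ++ [s.1 + t.2]) else s)
              (0, [])
            (st.1.insert p (minimo_lista la.2, maximo_lista la.2), st.2 ++ [p])
          else st)
        (d, c)).1.items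
      = d.items ++ ps.map (fun p =>
          (p, (minimo_lista (pvCum 0 (pvVals p xs)), maximo_lista (pvCum 0 (pvVals p xs))))) := by
  intro ps
  induction ps with
  | nil => intro d c _ _ _; simp
  | cons p ps ih =>
    intro d c hnd hc hd
    have hcp : c.contains p = false := hc p (List.mem_cons_self ..)
    have hdp : d.contains p = false := hd p (List.mem_cons_self ..)
    have hpn : p ∉ ps := (List.nodup_cons.mp hnd).1
    rw [List.foldl_cons]
    simp only [hcp, Bool.not_false, if_true]
    rw [inner_fold_eq]
    simp only [List.nil_append]
    rw [ih _ _ (List.nodup_cons.mp hnd).2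
      (fun q hq => by
        have hq1 : c.contains q = false := hc q (List.mem_cons_of_mem _ hq)
        have hq2 : q ≠ p := fun he => hpn (he ▸ hq)
        simp only [List.contains_append, hq1, Bool.false_or]
        simp [hq2])
      (fun q hq => by
        have hq2 : q ≠ p := fun he => hpn (he ▸ hq)
        rw [PySem.Dict.contains_insert]
        simp [hq2, hd q (List.mem_cons_of_mem _ hq)])]
    rw [PySem.Dict.items_insert_of_not_contains _ _ hdp]
    simp [List.append_assoc]

-- the per-product values agree
theorem per_key_eq (vs : List Int) (h : vs ≠ []) :
    (minimo_lista (pvCum 0 vs), maximo_lista (pvCum 0 vs))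
      = ((pvTrip vs).2.1, (pvTrip vs).2.2) := by
  match vs with
  | [] => exact absurd rfl h
  | v :: rest =>
    have hcum : pvCum 0 (v :: rest) = v :: pvCum v rest := by
      simp [pvCum]
    rw [hcum, minimo_eq_foldl_min, maximo_eq_foldl_max]
    simp only [pvTrip, trip_fold_eq]
    simp [List.foldl_cons]

-- ===== VERDICT (by name: the statement is the Claim_ definition above) =====
theorem stock_productos_spec : Claim_equal_stock_productos := by
  intro xs _
  show stock_productos xs = stock_productos_alt xs
  simp only [stock_productos, stock_productos_alt]
  rw [b_fold_items]
  rw [lista_productos_eq]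
  rw [a_fold_items xs _ PySem.Dict.empty []
    (PySem.Set.nodup_ofList _)
    (fun p _ => rfl)
    (fun p _ => PySem.Dict.contains_empty ..)]
  rw [List.map_map]
  simp only [PySem.Dict.empty, List.nil_append]
  apply List.map_congr_left
  intro p hp
  have hv : pvVals p xs ≠ [] :=
    vals_ne_nil_of_mem _ _ ((PySem.Set.mem_ofList _ _).mp hp)
  have := per_key_eq _ hv
  simp only [Function.comp]
  rw [show (minimo_lista (pvCum 0 (pvVals p xs)), maximo_lista (pvCum 0 (pvVals p xs)))
      = ((pvTrip (pvVals p xs)).2.1, (pvTrip (pvVals p xs)).2.2) from this]
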